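-- pv_equiv track=rewrite | github.com/darianrosebrook/distill | scripts/prompt_sources.py | get_tool_trace_prompts
-- ===== SOURCE A (Python) =====
-- from typing import List, Dict, Any
--
-- def get_tool_trace_prompts(n: int = 30) -> List[str]:
--     """Generate prompts that require tool use (JSON tool calls)."""
--     prompts = [
--         {
--             "prompt": "Search for information about Python decorators and summarize the top 3 results.",
--             "expected_tools": ["web_search", "summarize"],
--         },
--         {
--             "prompt": "Read the file config.yaml and extract all key-value pairs.",
--             "expected_tools": ["read_file", "extract"],
--         },
--         {
--             "prompt": "Search for recent papers on transformer architectures and list their titles.",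
--             "expected_tools": ["web_search", "extract"],
--         },
--         {
--             "prompt": "Read the code in src/main.py and identify all function definitions.",
--             "expected_tools": ["read_file", "parse_code"],
--         },
--         {
--             "prompt": "Search for the latest version of PyTorch and check if it's compatible with Python 3.11.",
--             "expected_tools": ["web_search", "check_compatibility"],
--         },
--         {
--             "prompt": "Read the README.md file and extract all code examples.",
--             "expected_tools": ["read_file", "extract_code"],
--         },
--         {
--             "prompt": "Search for best practices for training neural networks and create a summary.",
--             "expected_tools": ["web_search", "summarize"],
--         },
--         {
--             "prompt": "Read the requirements.txt file and list all dependencies with their versions.",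
--             "expected_tools": ["read_file", "parse_dependencies"],
--         },
--         {
--             "prompt": "Search for information about CoreML optimization and extract key techniques.",
--             "expected_tools": ["web_search", "extract"],
--         },
--         {
--             "prompt": "Read the config.yaml file and validate that all required fields are present.",
--             "expected_tools": ["read_file", "validate"],
--         },
--     ]
--
--     # Extend if needed
--     while len(prompts) < n:
--         prompts.extend(prompts[:min(len(prompts), n - len(prompts))])
--
--     # Return just the prompt strings
--     return [p["prompt"] if isinstance(p, dict) else p for p in prompts[:n]]
-- ===== SOURCE B (Python) =====
-- def get_tool_trace_prompts(n: int = 30) -> list: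
--     """Generate prompts that require tool use (JSON tool calls)."""
--     strings = [
--         "Search for information about Python decorators and summarize the top 3 results.",
--         "Read the file config.yaml and extract all key-value pairs.",
--         "Search for recent papers on transformer architectures and list their titles.",
--         "Read the code in src/main.py and identify all function definitions.",
--         "Search for the latest version of PyTorch and check if it's compatible with Python 3.11.",
--         "Read the README.md file and extract all code examples.",
--         "Search for best practices for training neural networks and create a summary.",
--         "Read the requirements.txt file and list all dependencies with their versions.",
--         "Search for information about CoreML optimization and extract key techniques.",
--         "Read the config.yaml file and validate that all required fields are present.",
--     ]
--     if n <= len(strings):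
--         return strings[:n]
--     return [strings[i % len(strings)] for i in range(n)]
-- ===== Notes on version B (the rewrite author's own statement) =====
-- stated objective: idiomatic
-- what changed: Replaces the while-loop that repeatedly extends the list with copies of its own prefix (doubling) by a flat list of the prompt strings plus a closed-form modulo-cycling comprehension [strings[i % 10] for i in range(n)], with strings[:n] kept for n <= 10 to preserve slice semantics for small/negative n.
import Mathlib
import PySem

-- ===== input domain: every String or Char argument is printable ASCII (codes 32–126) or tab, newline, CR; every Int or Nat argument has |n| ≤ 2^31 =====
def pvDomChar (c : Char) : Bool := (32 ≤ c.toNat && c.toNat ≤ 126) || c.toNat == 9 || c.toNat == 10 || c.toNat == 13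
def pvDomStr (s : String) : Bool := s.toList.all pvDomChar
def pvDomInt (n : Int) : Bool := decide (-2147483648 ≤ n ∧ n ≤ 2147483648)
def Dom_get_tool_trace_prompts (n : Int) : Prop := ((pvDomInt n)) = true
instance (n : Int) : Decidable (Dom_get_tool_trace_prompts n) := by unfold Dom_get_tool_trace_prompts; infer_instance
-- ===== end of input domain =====

-- B replaces A's self-extending doubling loop with a direct modulo-cycling comprehension (idiomatic; same cost).


-- ===== PORT A =====
-- the literal `prompts` list: each dict as (prompt, expected_tools)
def pvBaseA : List (String × List String) :=
  [ ("Search for information about Python decorators and summarize the top 3 results.", ["web_search", "summarize"]),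
    ("Read the file config.yaml and extract all key-value pairs.", ["read_file", "extract"]),
    ("Search for recent papers on transformer architectures and list their titles.", ["web_search", "extract"]),
    ("Read the code in src/main.py and identify all function definitions.", ["read_file", "parse_code"]),
    ("Search for the latest version of PyTorch and check if it's compatible with Python 3.11.", ["web_search", "check_compatibility"]),
    ("Read the README.md file and extract all code examples.", ["read_file", "extract_code"]),
    ("Search for best practices for training neural networks and create a summary.", ["web_search", "summarize"]),
    ("Read the requirements.txt file and list all dependencies with their versions.", ["read_file", "parse_dependencies"]),
    ("Search for information about CoreML optimization and extract key techniques.", ["web_search", "extract"]),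
    ("Read the config.yaml file and validate that all required fields are present.", ["read_file", "validate"]) ]

-- while len(prompts) < n: prompts.extend(prompts[:min(len(prompts), n - len(prompts))])
-- (the nonemptiness hypothesis only justifies termination; it does not alter the computation)
def pvLoopA (n : Int) (prompts : List (String × List String)) (h : prompts ≠ []) :
    List (String × List String) :=
  if hlt : (prompts.length : Int) < n then
    pvLoopA n
      (prompts ++ PySem.List.slice prompts none
        (some (min (prompts.length : Int) (n - (prompts.length : Int)))))
      (by simp [h])
  else prompts
termination_by (n - (prompts.length : Int)).toNat
decreasing_by
  have h1 : 1 ≤ prompts.length := List.length_pos_of_ne_nil h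
  rw [PySem.List.slice_to _ (by omega)]
  simp only [List.length_append, List.length_take]
  omega

def get_tool_trace_prompts (n : Int) : List String :=
  (PySem.List.slice (pvLoopA n pvBaseA (by decide)) none (some n)).map (·.1)

-- ===== PORT B =====
def pvStringsB : List String :=
  [ "Search for information about Python decorators and summarize the top 3 results.",
    "Read the file config.yaml and extract all key-value pairs.",
    "Search for recent papers on transformer architectures and list their titles.",
    "Read the code in src/main.py and identify all function definitions.",
    "Search for the latest version of PyTorch and check if it's compatible with Python 3.11.",
    "Read the README.md file and extract all code examples.",
    "Search for best practices for training neural networks and create a summary.",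
    "Read the requirements.txt file and list all dependencies with their versions.",
    "Search for information about CoreML optimization and extract key techniques.",
    "Read the config.yaml file and validate that all required fields are present." ]

def get_tool_trace_prompts_alt (n : Int) : List String :=
  if n ≤ (pvStringsB.length : Int) then
    PySem.List.slice pvStringsB none (some n)
  else
    -- strings[i % len(strings)]: index provably in range, so pyGetD is exact here
    (PySem.List.pyRange 0 n 1).map
      (fun i => PySem.List.pyGetD pvStringsB (PySem.Int.mod i (pvStringsB.length : Int)) "")

-- ===== PRECONDITION & SPEC =====
def Spec_get_tool_trace_prompts (n : Int) (out : List String) : Prop := out = get_tool_trace_prompts_alt n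
instance (n : Int) (out : List String) : Decidable (Spec_get_tool_trace_prompts n out) := by unfold Spec_get_tool_trace_prompts; infer_instance

-- ===== CLAIM (what is proved, stated in full; the proofs are below) =====
def Claim_equal_get_tool_trace_prompts : Prop := ∀ (n : Int), Dom_get_tool_trace_prompts n → Spec_get_tool_trace_prompts n (get_tool_trace_prompts n)

-- ===== LEMMAS AND PROOFS =====

-- the cyclic repetition of the base list, of length m
def pvCyc (m : Nat) : List (String × List String) :=
  (List.range m).map (fun i => pvBaseA.getD (i % 10) ("", []))

theorem pvCyc_length (m : Nat) : (pvCyc m).length = m := by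
  simp [pvCyc]

theorem pvCyc_ten : pvCyc 10 = pvBaseA := by decide

theorem pvCyc_append (m k : Nat) (hk : k ≤ m) (hdvd : 10 ∣ m) :
    pvCyc m ++ (pvCyc m).take k = pvCyc (m + k) := by
  obtain ⟨t, rfl⟩ := hdvd
  unfold pvCyc
  rw [← List.map_take, List.take_range, min_eq_left hk, List.range_add, List.map_append]
  congr 1
  simp only [List.map_map]
  apply List.map_congr_left
  intro i _
  simp

theorem pvLoopA_done (n : Int) (p : List (String × List String)) (h : p ≠ [])
    (hge : ¬ ((p.length : Int) < n)) : pvLoopA n p h = p := by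
  rw [pvLoopA.eq_def]; simp [hge]

theorem pvLoopA_cyc (n : Int) (m : Nat) (p : List (String × List String)) (hp : p = pvCyc m)
    (h : p ≠ []) (h10 : 10 ≤ m) (hdvd : 10 ∣ m) (hlt : (m : Int) < n) :
    pvLoopA n p h = pvCyc n.toNat := by
  induction hfuel : (n - (m : Int)).toNat using Nat.strong_induction_on generalizing m p with
  | _ fuel ih =>
    subst hp hfuel
    rw [pvLoopA.eq_def]
    have hlen : ((pvCyc m).length : Int) = (m : Int) := by rw [pvCyc_length]
    rw [dif_pos (by rw [pvCyc_length]; exact hlt)]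
    have hk : (min ((pvCyc m).length : Int) (n - ((pvCyc m).length : Int))).toNat
        = min m (n - (m : Int)).toNat := by rw [pvCyc_length]; omega
    have hnew : pvCyc m ++ PySem.List.slice (pvCyc m) none
        (some (min ((pvCyc m).length : Int) (n - ((pvCyc m).length : Int))))
        = pvCyc (m + min m (n - (m : Int)).toNat) := by
      rw [PySem.List.slice_to _ (by rw [pvCyc_length]; omega), hk]
      exact pvCyc_append m _ (by omega) hdvd
    set k : Nat := min m (n - (m : Int)).toNat with hkdef
    by_cases hc : ((m + k : Nat) : Int) < n
    · -- still short of n: then k = m, the list doubled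
      have hkm : k = m := by omega
      exact ih (n - ((m + k : Nat) : Int)).toNat (by omega) (m + k) _ hnew (by simp [h])
        (by omega) (by omega) hc rfl
    · -- reached n exactly: the loop stops on the next test
      rw [pvLoopA_done n _ (by simp [h]) (by rw [hnew, pvCyc_length]; exact hc)]
      rw [hnew]
      congr 1
      omega

-- the prompt strings are the first components of the base dicts, at every index (defaults agree too)
theorem pvStrings_eq (j : Nat) : pvStringsB.getD j "" = (pvBaseA.getD j ("", [])).1 := by
  match j with
  | 0 => rfl | 1 => rfl | 2 => rfl | 3 => rfl | 4 => rfl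
  | 5 => rfl | 6 => rfl | 7 => rfl | 8 => rfl | 9 => rfl
  | j + 10 => rfl

theorem map_slice_to {α β : Type} (f : α → β) (xs : List α) (b : Int) :
    (PySem.List.slice xs none (some b)).map f = PySem.List.slice (xs.map f) none (some b) := by
  simp only [PySem.List.slice, PySem.List.clampIdx, List.length_map]
  split_ifs <;> simp [List.map_take]

-- ===== VERDICT (by name: the statement is the Claim_ definition above) =====
theorem get_tool_trace_prompts_spec : Claim_equal_get_tool_trace_prompts := by
  intro n _
  unfold Spec_get_tool_trace_prompts get_tool_trace_prompts get_tool_trace_prompts_alt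
  have hlenB : (pvStringsB.length : Int) = 10 := by decide
  by_cases hle : n ≤ (pvStringsB.length : Int)
  · -- n ≤ 10: the while loop never runs, both sides are a slice of the base
    have hlenA : (pvBaseA.length : Int) = 10 := by decide
    rw [if_pos hle, pvLoopA_done n pvBaseA (by decide) (by omega)]
    rw [map_slice_to,
      show pvBaseA.map (fun x => x.1) = pvStringsB from by decide]
  · -- n > 10: the loop yields pvCyc n.toNat; compare pointwise via modulo indices
    rw [if_neg hle]
    rw [pvLoopA_cyc n 10 pvBaseA pvCyc_ten.symm _ (le_refl 10) ⟨1, rfl⟩ (by push_cast; omega)]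
    have hslice : PySem.List.slice (pvCyc n.toNat) none (some n) = pvCyc n.toNat := by
      rw [PySem.List.slice_to _ (by omega)]
      exact List.take_of_length_le (by rw [pvCyc_length])
    rw [hslice, hlenB, PySem.List.pyRange_one]
    unfold pvCyc
    rw [List.map_map, List.map_map]
    simp only [Int.sub_zero]
    apply List.map_congr_left
    intro i _
    simp only [Function.comp]
    have hmod : PySem.Int.mod (0 + (i : Int)) 10 = ((i % 10 : Nat) : Int) := by
      simp only [PySem.Int.mod, zero_add]
      rw [Int.fmod_eq_emod]
      push_cast
      simp
    rw [hmod, PySem.List.pyGetD_natCast]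
    exact (pvStrings_eq (i % 10)).symm
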